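-- pv_equiv track=rewrite | github.com/BuweiChen/snds265 | test.py | can_place_in_window
-- ===== SOURCE A (Python) =====
-- def can_place_in_window(window, new_distance):
--     """Check if we can place the new distance in this window without violating the sliding window constraint."""
--     window.sort()  # Ensure sorted order
--     window.append(new_distance)  # Temporarily add the new distance
--     window.sort()  # Sort again to keep it in order
--
--     # Check the sliding window rule: no more than 4 elements within 10 units of each other
--     for i in range(len(window) - 4 + 1):
--         if window[i + 3] - window[i] > 10:
--             window.remove(new_distance)  # Undo the addition
--             return False
--     return True
-- ===== SOURCE B (Python) =====
-- def can_place_in_window(window, new_distance):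
--     """Check if we can place the new distance in this window without violating the sliding window constraint."""
--     window.sort()
--     # insert new_distance at its sorted position (kept if the check passes)
--     pos = len(window)
--     for k, v in enumerate(window):
--         if new_distance < v:
--             pos = k
--             break
--     window.insert(pos, new_distance)
--     # two-pointer sweep: left is the smallest index with window[j] - window[left] <= 10
--     left = 0
--     for j in range(3, len(window)):
--         while window[j] - window[left] > 10:
--             left += 1
--         if j <= left + 2:  # fewer than 4 elements span more than 10 units
--             window.remove(new_distance)
--             return False
--     return True
-- ===== Notes on version B (the rewrite author's own statement) =====
-- stated objective: alternative
-- what changed: A's append-then-resort plus a fixed-offset scan (window[i+3]-window[i] at every i) is replaced by a sorted-position insertion and a two-pointer sliding-window sweep that maintains the smallest index left within 10 units of window[j] and fails when fewer than 4 elements fit; both mutate window identically.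
import Mathlib
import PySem

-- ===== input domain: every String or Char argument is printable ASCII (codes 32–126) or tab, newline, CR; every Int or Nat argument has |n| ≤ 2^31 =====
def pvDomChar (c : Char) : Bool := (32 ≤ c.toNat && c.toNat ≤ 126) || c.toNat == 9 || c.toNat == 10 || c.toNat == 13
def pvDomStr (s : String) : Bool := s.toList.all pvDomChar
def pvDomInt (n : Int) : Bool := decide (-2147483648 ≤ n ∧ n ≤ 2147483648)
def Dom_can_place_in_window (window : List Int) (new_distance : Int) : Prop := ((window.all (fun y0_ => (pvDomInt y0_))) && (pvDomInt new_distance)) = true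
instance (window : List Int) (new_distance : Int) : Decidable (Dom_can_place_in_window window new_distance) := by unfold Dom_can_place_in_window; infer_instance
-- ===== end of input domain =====

-- B replaces A's fixed-offset scan (window[i+3]-window[i]) with a two-pointer sweep that
-- maintains the smallest index `left` within 10 units of window[j]; equivalence is about the
-- RETURN value (both Pythons also mutate `window` identically: sorted, with new_distance
-- inserted on True and removed again on False).

-- ===== PORT A =====
-- the for-loop of A: returns False at the first i with window[i+3]-window[i] > 10
def pvLoopA (w : List Int) : List Int → Bool
  | [] => true
  | i :: rest =>
    if PySem.List.pyGetD w (i + 3) 0 - PySem.List.pyGetD w i 0 > 10 then false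
    else pvLoopA w rest

def can_place_in_window (window : List Int) (new_distance : Int) : Bool :=
  let w0 := PySem.List.sorted window (fun x => x) false
  let w := PySem.List.sorted (w0 ++ [new_distance]) (fun x => x) false
  pvLoopA w (PySem.List.pyRange 0 ((w.length : Int) - 4 + 1) 1)

-- ===== PORT B =====
-- Source B: `pos` = first index k with new_distance < window[k], default len(window)
def pvBpos (d : Int) : List Int → Nat
  | [] => 0
  | x :: xs => if d < x then 0 else pvBpos d xs + 1

-- Source B: window.insert(pos, d) for 0 ≤ pos ≤ len(window)
def pvInsertAt (xs : List Int) (pos : Nat) (d : Int) : List Int :=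
  xs.take pos ++ d :: xs.drop pos

-- Source B: the inner `while window[j] - window[left] > 10: left += 1` (fuel j - left is exact:
-- the condition is false at left = j, so the while never runs more than j - left times)
def pvAdv (w : List Int) (j : Nat) : Nat → Nat → Nat
  | left, 0 => left
  | left, fuel + 1 =>
    if w.getD j 0 - w.getD left 0 > 10 then pvAdv w j (left + 1) fuel else left

-- Source B: the outer `for j in range(3, len(window))`
def pvLoopB (w : List Int) (j left : Nat) : Bool :=
  if j < w.length then
    let L := pvAdv w j left (j - left)
    if j ≤ L + 2 then false else pvLoopB w (j + 1) L
  else true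
termination_by w.length - j

def can_place_in_window_alt (window : List Int) (new_distance : Int) : Bool :=
  let w0 := PySem.List.sorted window (fun x => x) false
  let w := pvInsertAt w0 (pvBpos new_distance w0) new_distance
  pvLoopB w 3 0

-- ===== PRECONDITION & SPEC =====
def Spec_can_place_in_window (window : List Int) (new_distance : Int) (out : Bool) : Prop := out = can_place_in_window_alt window new_distance
instance (window : List Int) (new_distance : Int) (out : Bool) : Decidable (Spec_can_place_in_window window new_distance out) := by unfold Spec_can_place_in_window; infer_instance

-- ===== CLAIM (what is proved, stated in full; the proofs are below) =====
def Claim_equal_can_place_in_window : Prop := ∀ (window : List Int) (new_distance : Int), Dom_can_place_in_window window new_distance → Spec_can_place_in_window window new_distance (can_place_in_window window new_distance)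

-- ===== LEMMAS AND PROOFS =====

-- sorted lists are monotone by index
theorem pv_sorted_mono (w : List Int) (hw : w.Pairwise (· ≤ ·)) (a b : Nat)
    (hab : a ≤ b) (hb : b < w.length) : (w[a]?).getD 0 ≤ (w[b]?).getD 0 := by
  rcases Nat.lt_or_ge a b with h | h
  · have ha : a < w.length := by omega
    have := (List.pairwise_iff_getElem.mp hw) a b ha hb h
    rw [List.getElem?_eq_getElem ha, List.getElem?_eq_getElem hb]
    simpa using this
  · have : a = b := by omega
    subst this; rfl

-- recursive view of B's insertion (pos-then-insert)
def pvIns (d : Int) : List Int → List Int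
  | [] => [d]
  | x :: xs => if d < x then d :: x :: xs else x :: pvIns d xs

theorem pv_insertAt_eq_ins (d : Int) (s : List Int) :
    pvInsertAt s (pvBpos d s) d = pvIns d s := by
  induction s with
  | nil => rfl
  | cons x xs ih =>
    by_cases h : d < x
    · simp [pvInsertAt, pvBpos, pvIns, h]
    · simp [pvInsertAt, pvBpos, pvIns, h] at ih ⊢; simpa [pvInsertAt] using ih

theorem pv_ins_perm (d : Int) (s : List Int) : (pvIns d s).Perm (s ++ [d]) := by
  induction s with
  | nil => simp [pvIns]
  | cons x xs ih =>
    by_cases h : d < x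
    · simp [pvIns, h]
      exact List.Perm.symm (List.perm_append_singleton d (x :: xs))
    · simpa [pvIns, h] using ih.cons x

theorem pv_mem_ins (d y : Int) (s : List Int) (h : y ∈ pvIns d s) : y ∈ s ∨ y = d := by
  have := (pv_ins_perm d s).mem_iff.mp h
  simpa using this

theorem pv_ins_pairwise (d : Int) (s : List Int) (hs : s.Pairwise (· ≤ ·)) :
    (pvIns d s).Pairwise (· ≤ ·) := by
  induction s with
  | nil => simp [pvIns]
  | cons x xs ih =>
    rcases List.pairwise_cons.mp hs with ⟨hx, hxs⟩
    by_cases h : d < x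
    · rw [pvIns, if_pos h]
      refine List.pairwise_cons.mpr ⟨?_, hs⟩
      intro y hy
      rcases List.mem_cons.mp hy with rfl | hy'
      · omega
      · exact le_trans (le_of_lt h) (hx _ hy')
    · rw [pvIns, if_neg h]
      refine List.pairwise_cons.mpr ⟨?_, ih hxs⟩
      intro y hy
      rcases pv_mem_ins d y xs hy with hy' | rfl
      · exact hx _ hy'
      · omega

-- both ports run their scan over the SAME sorted list
theorem pv_same_list (s : List Int) (d : Int) (hs : s.Pairwise (· ≤ ·)) :
    PySem.List.sorted (s ++ [d]) (fun x => x) false = pvInsertAt s (pvBpos d s) d := by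
  rw [pv_insertAt_eq_ins]
  exact PySem.List.sorted_id_eq_of_perm_of_pairwise _ _ (pv_ins_perm d s) (pv_ins_pairwise d s hs)

-- A's loop is the universal fixed-offset condition over its index list
theorem pv_loopA_iff (w : List Int) (l : List Int) :
    pvLoopA w l = true ↔ ∀ i ∈ l, PySem.List.pyGetD w (i + 3) 0 - PySem.List.pyGetD w i 0 ≤ 10 := by
  induction l with
  | nil => simp [pvLoopA]
  | cons i rest ih =>
    by_cases h : PySem.List.pyGetD w (i + 3) 0 - PySem.List.pyGetD w i 0 > 10
    · simp [pvLoopA, h]; omega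
    · simp [pvLoopA, h, ih]
      intro _; omega

-- the advance (while) loop: with enough fuel, the result L is the least index with
-- w[j] - w[L] ≤ 10 above the entry point
theorem pv_adv_spec (w : List Int) (j : Nat) :
    ∀ fuel left, left ≤ j → j ≤ left + fuel →
      (∀ m, m < left → (w[j]?).getD 0 - (w[m]?).getD 0 > 10) →
      left ≤ pvAdv w j left fuel ∧ pvAdv w j left fuel ≤ j ∧
      (∀ m, m < pvAdv w j left fuel → (w[j]?).getD 0 - (w[m]?).getD 0 > 10) ∧
      (w[j]?).getD 0 - (w[(pvAdv w j left fuel)]?).getD 0 ≤ 10 := by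
  intro fuel
  induction fuel with
  | zero =>
    intro left h1 h2 hb
    have : left = j := by omega
    subst this
    simp only [pvAdv]
    exact ⟨le_refl _, le_refl _, hb, by omega⟩
  | succ f ih =>
    intro left h1 h2 hb
    simp only [pvAdv, List.getD_eq_getElem?_getD]
    by_cases h : (w[j]?).getD 0 - (w[left]?).getD 0 > 10
    · rw [if_pos (by omega)]
      have hlt : left < j := by
        rcases Nat.lt_or_ge left j with h' | h'
        · exact h'
        · have : left = j := by omega
          subst this; omega
      obtain ⟨a1, a2, a3, a4⟩ := ih (left + 1) (by omega) (by omega)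
        (by intro m hm
            rcases Nat.lt_or_ge m left with h' | h'
            · exact hb m h'
            · have : m = left := by omega
              subst this; exact h)
      exact ⟨by omega, a2, a3, a4⟩
    · rw [if_neg (by omega)]
      exact ⟨le_refl _, h1, hb, by omega⟩

-- B's outer loop computes the same universal condition, in Nat-index form
theorem pv_loopB_iff (w : List Int) (hw : w.Pairwise (· ≤ ·)) :
    ∀ fuel j left, w.length - j ≤ fuel → 3 ≤ j → left ≤ j →
      (∀ m, m < left → j < w.length → (w[j]?).getD 0 - (w[m]?).getD 0 > 10) →
      (pvLoopB w j left = true ↔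
        ∀ k, 3 ≤ k → j ≤ k → k < w.length → (w[k]?).getD 0 - (w[(k - 3)]?).getD 0 ≤ 10) := by
  intro fuel
  induction fuel with
  | zero =>
    intro j left hfuel h3 hlj hbelow
    have hjn : ¬ j < w.length := by omega
    rw [pvLoopB]
    simp only [hjn, if_false]
    constructor
    · intro _ k _ hk hk'; omega
    · intro _; trivial
  | succ f ih =>
    intro j left hfuel h3 hlj hbelow
    by_cases hjn : j < w.length
    · have adv := pv_adv_spec w j (j - left) left hlj (by omega) (fun m hm => hbelow m hm hjn)
      set L := pvAdv w j left (j - left) with hL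
      rw [pvLoopB]
      simp only [hjn, if_true, ← hL]
      by_cases htest : j ≤ L + 2
      · rw [if_pos htest]
        simp only [Bool.false_eq_true, false_iff]
        intro hall
        have hj := hall j h3 (le_refl j) hjn
        have h1 := adv.2.2.1 (j - 3) (by omega)
        omega
      · rw [if_neg htest]
        have ihnext := ih (j + 1) L (by omega) (by omega) (by omega)
          (by intro m hm hj1
              have h1 := adv.2.2.1 m hm
              have h2 := pv_sorted_mono w hw j (j + 1) (by omega) hj1
              omega)
        rw [ihnext]
        constructor
        · intro hall k hk3 hjk hkn
          rcases Nat.lt_or_ge j k with h' | h'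
          · exact hall k hk3 (by omega) hkn
          · have : k = j := by omega
            subst this
            have hm := pv_sorted_mono w hw L (k - 3) (by omega) (by omega)
            have := adv.2.2.2
            omega
        · intro hall k hk3 hjk hkn
          exact hall k hk3 (by omega) hkn
    · rw [pvLoopB]
      simp only [hjn, if_false]
      constructor
      · intro _ k _ hk hk'; omega
      · intro _; trivial

-- bridge: A's Int-indexed condition over the pyRange equals B's Nat-indexed condition
theorem pv_cond_bridge (w : List Int) :
    (∀ i ∈ PySem.List.pyRange 0 ((w.length : Int) - 4 + 1) 1,
        PySem.List.pyGetD w (i + 3) 0 - PySem.List.pyGetD w i 0 ≤ 10) ↔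
    (∀ k, 3 ≤ k → k < w.length → (w[k]?).getD 0 - (w[(k - 3)]?).getD 0 ≤ 10) := by
  constructor
  · intro h k hk3 hkn
    have hmem : ((k : Int) - 3) ∈ PySem.List.pyRange 0 ((w.length : Int) - 4 + 1) 1 := by
      rw [PySem.List.mem_pyRange_one]; omega
    have h0 := h _ hmem
    have e1 : (k : Int) - 3 + 3 = ((k : Nat) : Int) := by ring
    have e2 : ((k : Int) - 3) = ((k - 3 : Nat) : Int) := by omega
    rw [e1, e2, PySem.List.pyGetD_natCast, PySem.List.pyGetD_natCast,
      List.getD_eq_getElem?_getD, List.getD_eq_getElem?_getD] at h0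
    exact h0
  · intro h i hi
    rw [PySem.List.mem_pyRange_one] at hi
    obtain ⟨k, rfl⟩ : ∃ k : Nat, ((k : Int)) = i := ⟨i.toNat, by omega⟩
    have hk : k + 3 < w.length := by omega
    have h0 := h (k + 3) (by omega) hk
    have e : ((k : Int)) + 3 = ((k + 3 : Nat) : Int) := by omega
    have e2 : (k + 3) - 3 = k := by omega
    rw [e2] at h0
    rw [e, PySem.List.pyGetD_natCast, PySem.List.pyGetD_natCast,
      List.getD_eq_getElem?_getD, List.getD_eq_getElem?_getD]
    exact h0

-- ===== VERDICT (by name: the statement is the Claim_ definition above) =====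
theorem can_place_in_window_spec : Claim_equal_can_place_in_window := by
  intro window new_distance _
  unfold Spec_can_place_in_window
  simp only [can_place_in_window, can_place_in_window_alt]
  set s := PySem.List.sorted window (fun x => x) false with hs
  have hsp : s.Pairwise (· ≤ ·) := by
    simpa using PySem.List.sorted_pairwise (xs := window) (key := fun x => x)
  rw [pv_same_list s new_distance hsp]
  set w := pvInsertAt s (pvBpos new_distance s) new_distance with hwdef
  have hwp : w.Pairwise (· ≤ ·) := by
    rw [hwdef, pv_insertAt_eq_ins]
    exact pv_ins_pairwise _ _ hsp
  have hA := pv_loopA_iff w (PySem.List.pyRange 0 ((w.length : Int) - 4 + 1) 1)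
  have hB := pv_loopB_iff w hwp w.length 3 0 (by omega) (by omega) (by omega)
    (by intro m hm; omega)
  have hbr := pv_cond_bridge w
  have hiff : pvLoopA w (PySem.List.pyRange 0 ((w.length : Int) - 4 + 1) 1) = true ↔ pvLoopB w 3 0 = true := by
    rw [hA, hB]
    constructor
    · intro h k h3 _ hkn; exact (hbr.mp h) k h3 hkn
    · intro h; exact hbr.mpr (fun k h3 hkn => h k h3 h3 hkn)
  rcases Bool.eq_false_or_eq_true (pvLoopA w (PySem.List.pyRange 0 ((w.length : Int) - 4 + 1) 1)) with h | h <;>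
    rcases Bool.eq_false_or_eq_true (pvLoopB w 3 0) with h' | h' <;>
    simp_all
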